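-- pv_equiv track=rewrite | github.com/msrosenberg/ImpactFactor | Impact_Funcs.py | calculate_history_h_index
-- ===== SOURCE A (Python) =====
-- def calculate_history_h_index(citations: list, h: int) -> int:
--     tmp_cites = sorted(citations, reverse=True)
--     max_cites = max(tmp_cites)
--     hklist = [h]
--     k = 0
--     while max_cites > 2**k:
--         hk = 0
--         k += 1
--         for i, c in enumerate(tmp_cites):
--             if c >= (i+1) * 2**k:
--                 hk = i+1
--         if hk != 0:
--             hklist.append(hk)
--     return sum(hklist)
-- ===== SOURCE B (Python) =====
-- def calculate_history_h_index(citations: list, h: int) -> int: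
--     cs = sorted(citations, reverse=True)
--     m = cs[0]
--     total = h
--     k = 1
--     while m > 2 ** (k - 1):
--         t = 2 ** k
--         lo, hi = 0, len(cs)
--         while lo < hi:
--             mid = (lo + hi) // 2
--             if cs[mid] >= (mid + 1) * t:
--                 lo = mid + 1
--             else:
--                 hi = mid
--         total += lo
--         k += 1
--     return total
-- ===== Notes on version B (the rewrite author's own statement) =====
-- stated objective: faster
-- what changed: Per doubling threshold, B replaces A's full linear scan (tracking the last satisfying index) by a binary search for the prefix boundary on the descending-sorted list, and accumulates the sum directly instead of building a list.
-- outside the precondition, e.g. on calculate_history_h_index([], 3): A raises ValueError, B raises IndexError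
import Mathlib
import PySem

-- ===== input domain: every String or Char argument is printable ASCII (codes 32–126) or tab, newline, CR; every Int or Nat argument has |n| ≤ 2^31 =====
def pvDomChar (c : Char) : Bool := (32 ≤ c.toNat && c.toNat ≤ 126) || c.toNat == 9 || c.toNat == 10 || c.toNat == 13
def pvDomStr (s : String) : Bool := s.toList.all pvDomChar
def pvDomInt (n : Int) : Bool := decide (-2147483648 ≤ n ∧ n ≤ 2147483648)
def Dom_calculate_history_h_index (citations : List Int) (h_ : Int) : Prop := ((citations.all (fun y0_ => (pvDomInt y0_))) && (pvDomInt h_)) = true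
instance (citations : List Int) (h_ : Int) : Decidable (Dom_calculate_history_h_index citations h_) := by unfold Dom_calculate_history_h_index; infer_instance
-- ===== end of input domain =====

-- B replaces A's linear inner scan per threshold by a binary search over the
-- descending-sorted list (the satisfying indices form a prefix), accumulating
-- the sum directly instead of building a list.

-- ===== PORT A =====
-- inner for-loop over enumerate(tmp_cites): hk = last i+1 with c >= (i+1)*t
def pvAInner (tmp : List Int) (t : Int) : Int :=
  (PySem.List.enumerate tmp 0).foldl
    (fun hk p => if p.2 ≥ (p.1 + 1) * t then p.1 + 1 else hk) 0

-- while max_cites > 2**k: k += 1; compute hk for threshold 2**k; append if ≠ 0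
def pvALoop (tmp : List Int) (maxc : Int) (k : Nat) (hklist : List Int) : List Int :=
  if maxc > (2 : Int) ^ k then
    let hk := pvAInner tmp ((2 : Int) ^ (k + 1))
    pvALoop tmp maxc (k + 1) (if hk ≠ 0 then hklist ++ [hk] else hklist)
  else hklist
termination_by maxc.toNat - k
decreasing_by
  have h2 : (k : Int) < (2 : Int) ^ k := by exact_mod_cast Nat.lt_two_pow_self
  omega

def calculate_history_h_index (citations : List Int) (h_ : Int) : Int :=
  let tmp := PySem.List.sorted citations (fun x => x) true
  match PySem.List.max? tmp (fun x => x) with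
  | none => 0  -- unreachable inside Pre_: Python's max([]) raises ValueError
  | some maxc => (pvALoop tmp maxc 0 [h_]).sum

-- ===== PORT B =====
-- binary search: first index where cs[mid] >= (mid+1)*t fails
def pvBsearch (cs : List Int) (t : Int) (lo hi : Nat) : Nat :=
  if lo < hi then
    let mid := (lo + hi) / 2
    if cs.getD mid 0 ≥ ((mid : Int) + 1) * t then pvBsearch cs t (mid + 1) hi
    else pvBsearch cs t lo mid
  else lo
termination_by hi - lo
decreasing_by all_goals omega

def pvBLoop (cs : List Int) (m : Int) (k : Nat) (total : Int) : Int :=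
  if m > (2 : Int) ^ (k - 1) then
    pvBLoop cs m (k + 1) (total + (pvBsearch cs ((2 : Int) ^ k) 0 cs.length : Int))
  else total
termination_by m.toNat + 1 - k
decreasing_by
  have h2 : ((k - 1 : Nat) : Int) < (2 : Int) ^ (k - 1) := by exact_mod_cast Nat.lt_two_pow_self
  omega

def calculate_history_h_index_alt (citations : List Int) (h_ : Int) : Int :=
  let cs := PySem.List.sorted citations (fun x => x) true
  match PySem.List.pyGet? cs 0 with
  | none => 0  -- unreachable inside Pre_: Python's cs[0] raises IndexError
  | some m => pvBLoop cs m 1 h_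

-- ===== PRECONDITION & SPEC =====
-- A raises ValueError (max of empty sequence) on [], and B raises IndexError there.
def Pre_calculate_history_h_index (citations : List Int) (h_ : Int) : Prop := citations ≠ []
instance (citations : List Int) (h_ : Int) : Decidable (Pre_calculate_history_h_index citations h_) := by
  unfold Pre_calculate_history_h_index; infer_instance

def pvWitness_calculate_history_h_index : List Int × Int := ([5, 17, 3, 0, 9], 2)

def Spec_calculate_history_h_index (citations : List Int) (h_ : Int) (out : Int) : Prop := out = calculate_history_h_index_alt citations h_
instance (citations : List Int) (h_ : Int) (out : Int) : Decidable (Spec_calculate_history_h_index citations h_ out) := by unfold Spec_calculate_history_h_index; infer_instance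

-- ===== CLAIM (what is proved, stated in full; the proofs are below) =====
def Claim_equal_calculate_history_h_index : Prop := ∀ (citations : List Int) (h_ : Int), Dom_calculate_history_h_index citations h_ → Pre_calculate_history_h_index citations h_ → Spec_calculate_history_h_index citations h_ (calculate_history_h_index citations h_)

-- ===== LEMMAS AND PROOFS =====

-- the satisfying condition at (global) index i, for list cs and threshold t
def pvSat (cs : List Int) (t : Int) (i : Nat) : Prop := cs.getD i 0 ≥ ((i : Int) + 1) * t

-- descending lists: satisfying indices form a prefix
lemma pvSat_prefix {cs : List Int} {t : Int} (hdesc : cs.Pairwise (fun a b => b ≤ a))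
    (ht : 0 < t) {i j : Nat} (hij : i ≤ j) (hj : j < cs.length) (hs : pvSat cs t j) :
    pvSat cs t i := by
  unfold pvSat at *
  rcases lt_or_eq_of_le hij with h | h
  · have hi : i < cs.length := lt_trans h hj
    have hle : cs[j] ≤ cs[i] := (List.pairwise_iff_getElem.mp hdesc) i j hi hj h
    rw [List.getD_eq_getElem cs 0 hj] at hs
    rw [List.getD_eq_getElem cs 0 hi]
    have : ((i : Int) + 1) * t ≤ ((j : Int) + 1) * t := by
      apply mul_le_mul_of_nonneg_right _ (le_of_lt ht)
      exact_mod_cast by omega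
    omega
  · subst h; exact hs

-- boundary predicate: r is THE prefix length
def pvBnd (cs : List Int) (t : Int) (r : Nat) : Prop :=
  r ≤ cs.length ∧ (∀ i < r, pvSat cs t i) ∧ (r < cs.length → ¬ pvSat cs t r)

lemma pvBnd_unique {cs : List Int} {t : Int} {r1 r2 : Nat}
    (h1 : pvBnd cs t r1) (h2 : pvBnd cs t r2) : r1 = r2 := by
  obtain ⟨hr1, hall1, hbd1⟩ := h1
  obtain ⟨hr2, hall2, hbd2⟩ := h2
  by_contra hne
  rcases Nat.lt_or_ge r1 r2 with h | h
  · exact hbd1 (lt_of_lt_of_le h hr2) (hall2 r1 h)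
  · have h' : r2 < r1 := by omega
    exact hbd2 (lt_of_lt_of_le h' hr1) (hall1 r2 h')

lemma pvBsearch_bnd {cs : List Int} {t : Int} (hdesc : cs.Pairwise (fun a b => b ≤ a))
    (ht : 0 < t) : ∀ (n lo hi : Nat), hi - lo ≤ n → lo ≤ hi → hi ≤ cs.length →
    (∀ i < lo, pvSat cs t i) → (∀ i, hi ≤ i → i < cs.length → ¬ pvSat cs t i) →
    pvBnd cs t (pvBsearch cs t lo hi) := by
  intro n
  induction n with
  | zero =>
    intro lo hi h1 h2 h3 h4 h5
    have heq : ¬ (lo < hi) := by omega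
    rw [pvBsearch]; simp only [heq, if_false]
    exact ⟨by omega, h4, fun h => h5 lo (by omega) h⟩
  | succ n ih =>
    intro lo hi h1 h2 h3 h4 h5
    rw [pvBsearch]
    by_cases hlt : lo < hi
    · simp only [hlt, if_true]
      set mid := (lo + hi) / 2 with hmid
      by_cases hc : cs.getD mid 0 ≥ ((mid : Int) + 1) * t
      · simp only [hc, if_true]
        apply ih (mid + 1) hi (by omega) (by omega) h3
        · intro i hi'
          exact pvSat_prefix hdesc ht (by omega) (by omega) hc
        · exact h5
      · simp only [hc, if_false]
        apply ih lo mid (by omega) (by omega) (by omega) h4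
        intro i hmi hilen hsat
        exact hc (pvSat_prefix hdesc ht hmi hilen hsat)
    · simp only [hlt, if_false]
      exact ⟨by omega, h4, fun h => h5 lo (by omega) h⟩

-- A's fold, structurally (s = next enumerate index)
def pvAFold (t : Int) (cs : List Int) (s a : Int) : Int :=
  (PySem.List.enumerate cs s).foldl
    (fun hk p => if p.2 ≥ (p.1 + 1) * t then p.1 + 1 else hk) a

lemma pvAFold_nil (t : Int) (s a : Int) : pvAFold t [] s a = a := by
  simp [pvAFold, PySem.List.enumerate_nil]

lemma pvAFold_cons (t : Int) (c : Int) (cs : List Int) (s a : Int) :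
    pvAFold t (c :: cs) s a = pvAFold t cs (s + 1) (if c ≥ (s + 1) * t then s + 1 else a) := by
  simp [pvAFold, PySem.List.enumerate_cons]

lemma pvAFold_cases (t : Int) (cs : List Int) (s a : Int) :
    pvAFold t cs s a = a ∨
      ∃ k : Nat, k < cs.length ∧ cs.getD k 0 ≥ (s + k + 1) * t ∧ pvAFold t cs s a = s + k + 1 := by
  induction cs generalizing s a with
  | nil => left; exact pvAFold_nil t s a
  | cons c cs ih =>
    rw [pvAFold_cons]
    rcases ih (s + 1) (if c ≥ (s + 1) * t then s + 1 else a) with h | ⟨k, hk, hs, hr⟩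
    · rw [h]
      by_cases hc : c ≥ (s + 1) * t
      · right
        exact ⟨0, by simp, by simpa using hc, by simp [hc]⟩
      · left; simp [hc]
    · right
      refine ⟨k + 1, by simpa using hk, ?_, ?_⟩
      · simpa [List.getD_cons_succ] using (by push_cast at hs ⊢; linarith : cs.getD k 0 ≥ (s + ((k : Int) + 1) + 1) * t)
      · rw [hr]; push_cast; ring

lemma pvAFold_ge (t : Int) (cs : List Int) (s a : Int) (k : Nat)
    (hk : k < cs.length) (hs : cs.getD k 0 ≥ (s + k + 1) * t) :
    s + k + 1 ≤ pvAFold t cs s a := by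
  induction cs generalizing s a k with
  | nil => simp at hk
  | cons c cs ih =>
    rw [pvAFold_cons]
    cases k with
    | zero =>
      simp only [List.getD_cons_zero] at hs
      have hc : c ≥ (s + 1) * t := by push_cast at hs; linarith
      rw [if_pos hc]
      rcases pvAFold_cases t cs (s + 1) (s + 1) with h | ⟨k', _, _, hr⟩
      · rw [h]; push_cast; omega
      · rw [hr]; push_cast; omega
    | succ k =>
      rw [List.getD_cons_succ] at hs
      have := ih (s + 1) (if c ≥ (s + 1) * t then s + 1 else a) k (by simpa using hk)
        (by push_cast at hs ⊢; linarith)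
      push_cast at this ⊢
      linarith

lemma pvAInner_bnd {cs : List Int} {t : Int} (hdesc : cs.Pairwise (fun a b => b ≤ a))
    (ht : 0 < t) : 0 ≤ pvAInner cs t ∧ pvBnd cs t (pvAInner cs t).toNat := by
  have heq : pvAInner cs t = pvAFold t cs 0 0 := rfl
  rcases pvAFold_cases t cs 0 0 with h | ⟨k, hk, hs, hr⟩
  · rw [heq, h]
    refine ⟨le_refl 0, by simp, by simp, ?_⟩
    intro _ hsat
    have hsat' : cs.getD 0 0 ≥ ((0 : Int) + (0 : Nat) + 1) * t := by
      unfold pvSat at hsat; push_cast at hsat ⊢; linarith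
    have := pvAFold_ge t cs 0 0 0 (by omega) hsat'
    rw [h] at this; omega
  · rw [heq, hr]
    have hsk : pvSat cs t k := by unfold pvSat; push_cast at hs ⊢; linarith
    have htn : ((0 : Int) + (k : Int) + 1).toNat = k + 1 := by omega
    rw [htn]
    refine ⟨by omega, by omega, ?_, ?_⟩
    · intro i hik
      exact pvSat_prefix hdesc ht (by omega) hk hsk
    · intro hlen hsat
      have hsat' : cs.getD (k + 1) 0 ≥ ((0 : Int) + ((k + 1 : Nat) : Int) + 1) * t := by
        unfold pvSat at hsat; push_cast at hsat ⊢; linarith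
      have := pvAFold_ge t cs 0 0 (k + 1) hlen hsat'
      rw [hr] at this
      push_cast at this
      omega

lemma pvInner_eq_bsearch {cs : List Int} {t : Int} (hdesc : cs.Pairwise (fun a b => b ≤ a))
    (ht : 0 < t) : pvAInner cs t = (pvBsearch cs t 0 cs.length : Int) := by
  obtain ⟨hnn, hbnd⟩ := pvAInner_bnd hdesc ht
  have hb : pvBnd cs t (pvBsearch cs t 0 cs.length) :=
    pvBsearch_bnd hdesc ht cs.length 0 cs.length (by omega) (by omega) le_rfl
      (by omega) (by omega)
  have := pvBnd_unique hbnd hb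
  omega

lemma pvLoop_eq {cs : List Int} {maxc : Int} (hdesc : cs.Pairwise (fun a b => b ≤ a)) :
    ∀ (k : Nat) (acc : List Int), (pvALoop cs maxc k acc).sum = pvBLoop cs maxc (k + 1) acc.sum := by
  suffices H : ∀ (n k : Nat) (acc : List Int), maxc.toNat - k ≤ n →
      (pvALoop cs maxc k acc).sum = pvBLoop cs maxc (k + 1) acc.sum by
    intro k acc; exact H (maxc.toNat - k) k acc le_rfl
  intro n
  induction n with
  | zero =>
    intro k acc hn
    rw [pvALoop, pvBLoop]
    have hg : ¬ maxc > (2 : Int) ^ k := by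
      intro hg
      have h2 : (k : Int) < (2 : Int) ^ k := by exact_mod_cast Nat.lt_two_pow_self
      omega
    simp only [Nat.add_sub_cancel]
    rw [if_neg hg, if_neg hg]
  | succ n ih =>
    intro k acc hn
    rw [pvALoop, pvBLoop]
    simp only [Nat.add_sub_cancel]
    by_cases hg : maxc > (2 : Int) ^ k
    · rw [if_pos hg, if_pos hg]
      have h2 : (k : Int) < (2 : Int) ^ k := by exact_mod_cast Nat.lt_two_pow_self
      have ht : (0 : Int) < (2 : Int) ^ (k + 1) := by positivity
      have hhk : pvAInner cs ((2 : Int) ^ (k + 1)) = (pvBsearch cs ((2 : Int) ^ (k + 1)) 0 cs.length : Int) :=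
        pvInner_eq_bsearch hdesc ht
      have hacc : (if pvAInner cs ((2 : Int) ^ (k + 1)) ≠ 0 then acc ++ [pvAInner cs ((2 : Int) ^ (k + 1))] else acc).sum
          = acc.sum + (pvBsearch cs ((2 : Int) ^ (k + 1)) 0 cs.length : Int) := by
        by_cases hz : pvAInner cs ((2 : Int) ^ (k + 1)) ≠ 0
        · rw [if_pos hz, List.sum_append, List.sum_cons, List.sum_nil, hhk]; ring
        · rw [if_neg hz]
          push Not at hz
          rw [← hhk, hz, add_zero]
      rw [ih (k + 1) _ (by omega)]
      rw [hacc]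
    · rw [if_neg hg, if_neg hg]

-- ===== VERDICT (by name: the statement is the Claim_ definition above) =====
lemma pvFoldl_max_eq (l : List Int) (x : Int) (h : ∀ y ∈ l, y ≤ x) : l.foldl max x = x := by
  induction l with
  | nil => rfl
  | cons c l ih =>
    simp only [List.foldl_cons]
    rw [max_eq_left (h c (by simp))]
    exact ih (fun y hy => h y (by simp [hy]))

theorem calculate_history_h_index_spec : Claim_equal_calculate_history_h_index := by
  intro citations h_ _ hpre
  unfold Spec_calculate_history_h_index calculate_history_h_index calculate_history_h_index_alt
  have hne : PySem.List.sorted citations (fun x => x) true ≠ [] := by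
    rw [Ne, PySem.List.sorted_eq_nil_iff]; exact hpre
  obtain ⟨c, rest, hcs⟩ := List.exists_cons_of_ne_nil hne
  have hdesc : (PySem.List.sorted citations (fun x => x) true).Pairwise (fun a b => b ≤ a) := by
    simpa using PySem.List.sorted_pairwise_rev citations (fun x => x)
  rw [hcs]
  rw [hcs] at hdesc
  have hhead : ∀ y ∈ rest, y ≤ c := (List.pairwise_cons.mp hdesc).1
  have hmax : PySem.List.max? (c :: rest) (fun x => x) = some c := by
    rw [PySem.List.max?_id_cons, pvFoldl_max_eq rest c hhead]
  have hget : PySem.List.pyGet? (c :: rest) (0 : Int) = some c := by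
    simp [PySem.List.pyGet?, PySem.List.pyIdx?]
  simp only [hmax, hget]
  rw [pvLoop_eq hdesc 0 [h_]]
  simp
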